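-- pv_equiv track=rewrite | github.com/miriamveloso/ATP2022 | TPC5.py | sexo
-- ===== SOURCE A (Python) =====
-- def sexo(list):
--     m=0
--     f=0
--     for p in list:
--         if p[-1]=="1":
--             if p[1]=="M":
--                 m+=1
--             if p[1]=="F":
--                 f+=1
--     distrib=[("M",m),("F",f)]
--     return distrib
-- ===== SOURCE B (Python) =====
-- def sexo(list):
--     flags = [p[1] for p in list if p[-1] == "1"]
--     return [("M", flags.count("M")), ("F", flags.count("F"))]
-- ===== Notes on version B (the rewrite author's own statement) =====
-- stated objective: alternative
-- what changed: A's single fused pass with two running counters is replaced by a build-then-rescan decomposition: first collect the gender flags of qualifying records into a list, then count 'M' and 'F' in it with list.count.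
import Mathlib
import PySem

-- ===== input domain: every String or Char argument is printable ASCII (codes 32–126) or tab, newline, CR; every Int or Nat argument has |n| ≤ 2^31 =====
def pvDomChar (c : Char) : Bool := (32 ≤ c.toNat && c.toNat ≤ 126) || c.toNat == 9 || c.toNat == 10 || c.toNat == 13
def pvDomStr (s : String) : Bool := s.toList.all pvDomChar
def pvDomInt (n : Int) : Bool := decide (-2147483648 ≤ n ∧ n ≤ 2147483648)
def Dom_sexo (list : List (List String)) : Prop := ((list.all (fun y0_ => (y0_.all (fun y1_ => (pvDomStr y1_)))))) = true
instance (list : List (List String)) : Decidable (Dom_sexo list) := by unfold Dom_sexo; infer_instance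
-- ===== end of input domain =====

-- B replaces A's fused counting loop by building the list of flags of qualifying records and counting it; same cost, different decomposition.

-- ===== PORT A =====
-- loop body of A: test p[-1]=="1", then the two independent counter updates, in source order
def sexoStep (mf : Int × Int) (p : List String) : Int × Int :=
  if (PySem.List.pyGet? p (-1)).getD "" = "1" then
    let mf1 := if (PySem.List.pyGet? p 1).getD "" = "M" then (mf.1 + 1, mf.2) else mf
    if (PySem.List.pyGet? p 1).getD "" = "F" then (mf1.1, mf1.2 + 1) else mf1
  else mf

def sexo (list : List (List String)) : List (String × Int) :=
  let mf := list.foldl sexoStep (0, 0)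
  [("M", mf.1), ("F", mf.2)]

-- ===== PORT B =====
-- flags = [p[1] for p in list if p[-1] == "1"]
def sexoFlags (list : List (List String)) : List String :=
  (list.filter (fun p => (PySem.List.pyGet? p (-1)).getD "" == "1")).map
    (fun p => (PySem.List.pyGet? p 1).getD "")

def sexo_alt (list : List (List String)) : List (String × Int) :=
  let flags := sexoFlags list
  [("M", (flags.count "M" : Int)), ("F", (flags.count "F" : Int))]

-- ===== PRECONDITION & SPEC =====
-- Pre_ excludes exactly the inputs where the Python raises IndexError: an empty record (p[-1]),
-- or a one-element record whose last entry is "1" (p[1]).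
def Pre_sexo (list : List (List String)) : Prop :=
  ∀ p ∈ list, p ≠ [] ∧ (p.getLast? = some "1" → 2 ≤ p.length)
instance (list : List (List String)) : Decidable (Pre_sexo list) := by unfold Pre_sexo; infer_instance
def pvWitness_sexo : List (List String) := [["a", "M", "1"], ["b", "F", "0"], ["c", "F", "1"]]

def Spec_sexo (list : List (List String)) (out : List (String × Int)) : Prop := out = sexo_alt list
instance (list : List (List String)) (out : List (String × Int)) : Decidable (Spec_sexo list out) := by unfold Spec_sexo; infer_instance

-- ===== CLAIM (what is proved, stated in full; the proofs are below) =====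
def Claim_equal_sexo : Prop := ∀ (list : List (List String)), Dom_sexo list → Pre_sexo list → Spec_sexo list (sexo list)

-- ===== LEMMAS AND PROOFS =====
theorem sexo_foldl (l : List (List String)) (m f : Int) :
    l.foldl sexoStep (m, f) =
      (m + ((sexoFlags l).count "M" : Int), f + ((sexoFlags l).count "F" : Int)) := by
  induction l generalizing m f with
  | nil => simp [sexoFlags]
  | cons p l ih =>
    by_cases h1 : (PySem.List.pyGet? p (-1)).getD "" = "1"
    · have hf : sexoFlags (p :: l) = (PySem.List.pyGet? p 1).getD "" :: sexoFlags l := by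
        simp [sexoFlags, h1]
      by_cases hM : (PySem.List.pyGet? p 1).getD "" = "M"
      · simp [List.foldl_cons, sexoStep, h1, hM, ih, hf]
        ring
      · by_cases hF : (PySem.List.pyGet? p 1).getD "" = "F"
        · simp [List.foldl_cons, sexoStep, h1, hF, ih, hf]
          ring
        · simp [List.foldl_cons, sexoStep, h1, hM, hF, ih, hf]
    · have hf : sexoFlags (p :: l) = sexoFlags l := by
        simp [sexoFlags, h1]
      simp [List.foldl_cons, sexoStep, h1, ih, hf]

-- ===== VERDICT (by name: the statement is the Claim_ definition above) =====
theorem sexo_spec : Claim_equal_sexo := by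
  intro l _ _
  unfold Spec_sexo sexo sexo_alt
  simp [sexo_foldl]
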